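-- pv_equiv track=rewrite | github.com/stefannegele/adventofcode2023 | day3_2/engine.py | find_whole_number
-- ===== SOURCE A (Python) =====
-- def is_digit(char):
--     return char in ['0', '1', '2', '3', '4', '5', '6', '7', '8', '9']
--
-- def find_whole_number(line, position):
--     result_string = ''
--
--     while (position > 0 and is_digit(line[position - 1])):
--         position -= 1
--
--     while (position < len(line) and is_digit(line[position])):
--         result_string += line[position]
--         position += 1
--
--     return int(result_string)
-- ===== SOURCE B (Python) =====
-- DIGITS = '0123456789'
--
-- def find_whole_number(line, position):
--     head = line[:position]
--     start = position - (len(head) - len(head.rstrip(DIGITS)))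
--     rest = line[start:]
--     return int(rest[:len(rest) - len(rest.lstrip(DIGITS))])
-- ===== Notes on version B (the rewrite author's own statement) =====
-- stated objective: idiomatic
-- what changed: A's two character-by-character while loops (expand left, then collect forward) are replaced by whole-string slicing with rstrip/lstrip run-length arithmetic: B computes the start of the digit run as position minus the length of the trailing digit run of line[:position], then returns int of the leading digit run of line[start:], with no per-character loop of its own.
-- outside the precondition, e.g. on find_whole_number('12', -1): A returns 212, B returns 12
import Mathlib
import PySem

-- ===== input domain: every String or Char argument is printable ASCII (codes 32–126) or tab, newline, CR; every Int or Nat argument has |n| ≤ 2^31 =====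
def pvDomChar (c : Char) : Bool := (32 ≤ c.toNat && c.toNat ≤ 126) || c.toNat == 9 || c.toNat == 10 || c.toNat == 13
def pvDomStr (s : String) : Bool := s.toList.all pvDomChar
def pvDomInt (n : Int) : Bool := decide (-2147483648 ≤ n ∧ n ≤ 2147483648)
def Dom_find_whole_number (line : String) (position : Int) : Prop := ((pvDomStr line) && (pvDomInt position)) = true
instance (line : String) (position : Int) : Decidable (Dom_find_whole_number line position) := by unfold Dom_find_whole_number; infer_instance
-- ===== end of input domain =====

-- B replaces A's two character-by-character while loops with whole-string slicing and
-- rstrip/lstrip run-length arithmetic (objective: idiomatic; no speed claim).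

-- ===== PORT A =====
def is_digit (char : Char) : Bool :=
  ['0', '1', '2', '3', '4', '5', '6', '7', '8', '9'].contains char

-- first while loop: move position left while the preceding character is a digit
def fwnLeft (cs : List Char) (position : Int) : Int :=
  if h : position > 0 ∧ is_digit (PySem.List.pyGetD cs (position - 1) ' ') = true then
    fwnLeft cs (position - 1)
  else position
termination_by position.toNat
decreasing_by omega

-- second while loop: append digit characters to result_string while they last
def fwnCollect (cs : List Char) (position : Int) (result : List Char) : List Char :=
  if _h : position < (cs.length : Int) ∧ is_digit (PySem.List.pyGetD cs position ' ') = true then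
    fwnCollect cs (position + 1) (result ++ [PySem.List.pyGetD cs position ' '])
  else result
termination_by ((cs.length : Int) - position).toNat
decreasing_by omega

def find_whole_number (line : String) (position : Int) : Int :=
  let cs := line.toList
  let p := fwnLeft cs position
  let result_string := fwnCollect cs p []
  (PySem.Int.ofChars? result_string).getD 0   -- int(result_string); none (ValueError, empty string) is excluded by Pre_

-- ===== PORT B =====
def pvDIGITS : List Char := ['0', '1', '2', '3', '4', '5', '6', '7', '8', '9']

-- str.rstrip(chars) / str.lstrip(chars), ported by hand (PySem has no one-sided chars-strip);
-- exact: Python removes exactly the maximal trailing / leading run of characters of `chars`.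
def pyRstripChars (cs chars : List Char) : List Char := cs.rdropWhile (chars.contains ·)
def pyLstripChars (cs chars : List Char) : List Char := cs.dropWhile (chars.contains ·)

def find_whole_number_alt (line : String) (position : Int) : Int :=
  let cs := line.toList
  let head := PySem.List.slice cs none (some position)
  let start : Int := position - ((head.length : Int) - ((pyRstripChars head pvDIGITS).length : Int))
  let rest := PySem.List.slice cs (some start) none
  let num := PySem.List.slice rest none (some ((rest.length : Int) - ((pyLstripChars rest pvDIGITS).length : Int)))
  (PySem.Int.ofChars? num).getD 0   -- int(...); none (ValueError, empty string) is excluded by Pre_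

-- ===== PRECONDITION & SPEC =====
-- Pre_ restricts to the function's natural domain: an in-range, nonnegative position at or
-- directly after a digit.  Outside it A raises IndexError (position > len(line)) or
-- ValueError (no digit run at position, so int('')), except for negative positions, where a
-- value A returns stems from accidental Python negative-index wraparound and B's from slice
-- semantics — neither is specified behaviour, so negative positions are excluded as well.
def Pre_find_whole_number (line : String) (position : Int) : Prop :=
  0 ≤ position ∧ position ≤ (line.toList.length : Int) ∧
  ((position < (line.toList.length : Int) ∧
      PySem.List.pyGetD line.toList position ' ' ∈ ['0','1','2','3','4','5','6','7','8','9']) ∨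
   (0 < position ∧
      PySem.List.pyGetD line.toList (position - 1) ' ' ∈ ['0','1','2','3','4','5','6','7','8','9']))
instance (line : String) (position : Int) : Decidable (Pre_find_whole_number line position) := by
  unfold Pre_find_whole_number; infer_instance

def pvWitness_find_whole_number : String × Int := ("a42b", 2)

def Spec_find_whole_number (line : String) (position : Int) (out : Int) : Prop := out = find_whole_number_alt line position
instance (line : String) (position : Int) (out : Int) : Decidable (Spec_find_whole_number line position out) := by unfold Spec_find_whole_number; infer_instance

-- ===== CLAIM (what is proved, stated in full; the proofs are below) =====
def Claim_equal_find_whole_number : Prop := ∀ (line : String) (position : Int), Dom_find_whole_number line position → Pre_find_whole_number line position → Spec_find_whole_number line position (find_whole_number line position)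

-- ===== LEMMAS AND PROOFS =====

-- the first loop lands at the index following the last non-digit left of `position`
theorem fwnLeft_natCast (cs : List Char) (n : Nat) (hn : n ≤ cs.length) :
    fwnLeft cs (n : Int) = (((cs.take n).rdropWhile is_digit).length : Int) := by
  induction n with
  | zero => rw [fwnLeft]; simp
  | succ n ih =>
    have hn' : n < cs.length := hn
    have hget : PySem.List.pyGetD cs ((n : Int) + 1 - 1) ' ' = cs[n] := by
      simp [PySem.List.pyGetD_natCast, List.getD_eq_getElem?_getD, hn']
    have htake : cs.take (n + 1) = cs.take n ++ [cs[n]] := by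
      rw [List.take_add_one, List.getElem?_eq_getElem hn']; rfl
    rw [fwnLeft]
    push_cast
    by_cases hd : is_digit cs[n] = true
    · rw [dif_pos ⟨by omega, by rw [hget]; exact hd⟩]
      rw [show (n : Int) + 1 - 1 = (n : Int) by ring]
      rw [ih (le_of_lt hn'), htake, List.rdropWhile_concat_pos _ _ _ hd]
    · rw [dif_neg (by rw [hget]; tauto)]
      rw [htake, List.rdropWhile_concat_neg _ _ _ hd]
      simp; omega

-- the second loop appends exactly the digit run starting at `position`
theorem fwnCollect_natCast (cs : List Char) (n : Nat) (acc : List Char) :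
    fwnCollect cs (n : Int) acc = acc ++ (cs.drop n).takeWhile is_digit := by
  induction hk : cs.length - n generalizing n acc with
  | zero =>
    have hge : cs.length ≤ n := by omega
    rw [fwnCollect, dif_neg (by rintro ⟨h, -⟩; omega)]
    simp [List.drop_eq_nil_of_le hge]
  | succ k ih =>
    have hn' : n < cs.length := by omega
    have hget : PySem.List.pyGetD cs (n : Int) ' ' = cs[n] := by
      simp [PySem.List.pyGetD_natCast, List.getD_eq_getElem?_getD, hn']
    have hdrop : cs.drop n = cs[n] :: cs.drop (n + 1) := List.drop_eq_getElem_cons hn'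
    rw [fwnCollect]
    by_cases hd : is_digit cs[n] = true
    · rw [dif_pos ⟨by exact_mod_cast hn', by rw [hget]; exact hd⟩]
      rw [hget, show (n : Int) + 1 = ((n + 1 : Nat) : Int) by push_cast; ring]
      rw [ih (n + 1) _ (by omega)]
      rw [hdrop, List.takeWhile_cons_of_pos hd]
      simp
    · rw [dif_neg (by rw [hget]; tauto)]
      rw [hdrop, List.takeWhile_cons_of_neg hd]
      simp

-- l[:len(l) - len(l.lstrip(p))] is exactly the leading p-run of l
theorem takeWhile_eq_take_sub (p : Char → Bool) (l : List Char) :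
    l.take ((l.length : Int) - ((l.dropWhile p).length : Int)).toNat = l.takeWhile p := by
  have hsum : (l.takeWhile p).length + (l.dropWhile p).length = l.length := by
    conv_rhs => rw [← List.takeWhile_append_dropWhile (p := p) (l := l)]
    rw [List.length_append]
  have h1 : ((l.length : Int) - ((l.dropWhile p).length : Int)).toNat = (l.takeWhile p).length := by
    omega
  rw [h1, ← List.prefix_iff_eq_take.mp (List.takeWhile_prefix p)]

-- both programs compute int(digit run around the position), for any 0 ≤ position ≤ len
theorem main_eq (line : String) (n : Nat) (hn : n ≤ line.toList.length) :
    find_whole_number line (n : Int) = find_whole_number_alt line (n : Int) := by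
  set cs := line.toList with hcs
  set s := ((cs.take n).rdropWhile is_digit).length with hs
  have hslen : s ≤ cs.length := by
    have := (List.rdropWhile_prefix is_digit (cs.take n)).length_le
    have := List.length_take_le n cs
    omega
  simp only [find_whole_number, find_whole_number_alt]
  rw [fwnLeft_natCast cs n hn, fwnCollect_natCast cs s []]
  rw [PySem.List.slice_to_natCast, PySem.List.slice_from]
  · have hls : ∀ l : List Char, pyLstripChars l pvDIGITS = l.dropWhile is_digit := fun _ => rfl
    have hrs : pyRstripChars (cs.take n) pvDIGITS = (cs.take n).rdropWhile is_digit := rfl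
    have hlen_take : (cs.take n).length = n := by simp; omega
    have hstart : (n : Int) - (((cs.take n).length : Int) - ((pyRstripChars (cs.take n) pvDIGITS).length : Int)) = (s : Int) := by
      rw [hrs, hlen_take, hs]; omega
    rw [← hcs, hstart]
    rw [Int.toNat_natCast]
    have hb : (0:Int) ≤ ((cs.drop s).length : Int) - ((pyLstripChars (cs.drop s) pvDIGITS).length : Int) := by
      have := List.length_dropWhile_le (fun c => pvDIGITS.contains c) (cs.drop s)
      simp only [pyLstripChars]; omega
    rw [PySem.List.slice_to _ hb, hls, takeWhile_eq_take_sub is_digit (cs.drop s)]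
    simp
  · have hrs : pyRstripChars (cs.take n) pvDIGITS = (cs.take n).rdropWhile is_digit := rfl
    rw [← hcs, hrs]
    have := (List.rdropWhile_prefix is_digit (cs.take n)).length_le
    have := List.length_take_le n cs
    omega

-- ===== VERDICT (by name: the statement is the Claim_ definition above) =====
theorem find_whole_number_spec : Claim_equal_find_whole_number := by
  intro line position _hdom hpre
  obtain ⟨h0, hle, -⟩ := hpre
  unfold Spec_find_whole_number
  rw [show position = ((position.toNat : Nat) : Int) from (Int.toNat_of_nonneg h0).symm]
  exact main_eq line position.toNat (by omega)
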